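-- pv_equiv track=rewrite | github.com/samyama-ai/clinicaltrials-kg | nsclc/modality.py | _alias_hits
-- ===== SOURCE A (Python) =====
-- from typing import Any
--
-- _EvidenceList = list[dict[str, str]]
--
-- def _alias_hits(
--     modality_name: str,
--     aliases: list[str],
--     drugs: list[dict[str, Any]],
--     interventions: list[dict[str, Any]],
-- ) -> _EvidenceList:
--     """Return evidence rows for every alias substring hit on a drug/intervention name."""
--     out: _EvidenceList = []
--     if not aliases:
--         return out
--     lowered = [(a, a.lower()) for a in aliases if a]
--
--     for drug in drugs:
--         name = drug.get("name") or ""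
--         lname = name.lower()
--         for alias, lalias in lowered:
--             if lalias and lalias in lname:
--                 out.append(
--                     {
--                         "modality": modality_name,
--                         "matched_by": "alias",
--                         "evidence": (
--                             f"drug '{name}' matches alias '{alias}'"
--                         ),
--                     }
--                 )
--                 break  # one alias match per drug is plenty
--
--     for iv in interventions:
--         name = iv.get("name") or ""
--         lname = name.lower()
--         for alias, lalias in lowered:
--             if lalias and lalias in lname:
--                 out.append(
--                     {
--                         "modality": modality_name,
--                         "matched_by": "alias",
--                         "evidence": (
--                             f"intervention '{name}' matches alias '{alias}'"
--                         ),
--                     }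
--                 )
--                 break
--
--     return out
-- ===== SOURCE B (Python) =====
-- def _alias_hits(modality_name, aliases, drugs, interventions):
--     """Alias-major rewrite: one pass per alias assigns it to every still-unmatched
--     name it occurs in; since aliases are visited in list order, each name ends up
--     with its first matching alias, exactly as in the name-major original."""
--     lowered = [(a, a.lower()) for a in aliases if a]
--     entries = [("drug", d.get("name") or "") for d in drugs]
--     entries += [("intervention", iv.get("name") or "") for iv in interventions]
--     matched = [None] * len(entries)
--     for alias, lalias in lowered:
--         for j, (_, name) in enumerate(entries):
--             if matched[j] is None and lalias in name.lower():
--                 matched[j] = alias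
--     return [
--         {
--             "modality": modality_name,
--             "matched_by": "alias",
--             "evidence": f"{kind} '{name}' matches alias '{alias}'",
--         }
--         for (kind, name), alias in zip(entries, matched)
--         if alias is not None
--     ]
-- ===== Notes on version B (the rewrite author's own statement) =====
-- stated objective: alternative
-- what changed: B inverts the loop nesting: instead of scanning the alias list per name and breaking at the first hit, it makes one alias-major pass that assigns each alias to every still-unmatched name (first assignment wins, so each name still gets its first matching alias) and then emits evidence rows from the matched table over a single combined drug+intervention entry list.
import Mathlib
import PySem

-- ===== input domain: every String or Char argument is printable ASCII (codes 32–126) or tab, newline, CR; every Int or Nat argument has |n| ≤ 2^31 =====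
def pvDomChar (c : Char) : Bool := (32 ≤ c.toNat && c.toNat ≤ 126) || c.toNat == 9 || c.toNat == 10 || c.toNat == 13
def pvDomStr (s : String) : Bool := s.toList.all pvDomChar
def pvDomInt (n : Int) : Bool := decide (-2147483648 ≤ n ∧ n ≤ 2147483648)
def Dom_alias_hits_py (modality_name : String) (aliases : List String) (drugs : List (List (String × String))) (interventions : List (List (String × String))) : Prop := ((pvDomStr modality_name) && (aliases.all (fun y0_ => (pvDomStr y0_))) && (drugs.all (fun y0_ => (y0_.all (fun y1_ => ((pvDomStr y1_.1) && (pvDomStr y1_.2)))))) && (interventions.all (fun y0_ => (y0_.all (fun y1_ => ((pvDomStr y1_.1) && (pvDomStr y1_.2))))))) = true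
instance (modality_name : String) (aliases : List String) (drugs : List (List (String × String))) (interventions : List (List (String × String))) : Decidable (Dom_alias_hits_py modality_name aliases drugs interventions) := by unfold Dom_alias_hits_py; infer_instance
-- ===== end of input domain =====

-- B inverts the loop nesting (alias-major pass over a combined entry table instead of a per-name
-- alias scan with break); alternative decomposition, same asymptotic cost, no speed claim.

-- ===== PORT A =====
def pvGetName (d : List (String × String)) : String :=
  -- `d.get("name") or ""`: a missing key and an empty value both yield "" (the only falsy str)
  ((PySem.Dict.mk d).get? "name").getD ""

def pvRowA (modality ev : String) : List (String × String) :=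
  [("modality", modality), ("matched_by", "alias"), ("evidence", ev)]

-- inner `for alias, lalias in lowered: if lalias and lalias in lname: …; break`
def pvFindAliasA (lowered : List (String × String)) (lname : String) : Option String :=
  match lowered with
  | [] => none
  | (a, la) :: rest =>
      if la ≠ "" ∧ PySem.Str.isIn la lname = true then some a else pvFindAliasA rest lname

def alias_hits_py (modality_name : String) (aliases : List String) (drugs : List (List (String × String))) (interventions : List (List (String × String))) : List (List (String × String)) :=
  if aliases = [] then []
  else
    let lowered := (aliases.filter (fun a => a ≠ "")).map (fun a => (a, PySem.Str.lower a))
    let out := drugs.foldl (fun out drug =>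
      let name := pvGetName drug
      let lname := PySem.Str.lower name
      match pvFindAliasA lowered lname with
      | some ali => out ++ [pvRowA modality_name ("drug '" ++ name ++ "' matches alias '" ++ ali ++ "'")]
      | none => out) []
    interventions.foldl (fun out iv =>
      let name := pvGetName iv
      let lname := PySem.Str.lower name
      match pvFindAliasA lowered lname with
      | some ali => out ++ [pvRowA modality_name ("intervention '" ++ name ++ "' matches alias '" ++ ali ++ "'")]
      | none => out) out

-- ===== PORT B =====
-- `if matched[j] is None and lalias in name.lower(): matched[j] = alias`
def pvStepOne (al : String × String) (m : Option String) (e : String × String) : Option String :=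
  if m = none ∧ PySem.Str.isIn al.2 (PySem.Str.lower e.2) = true then some al.1 else m

def alias_hits_py_alt (modality_name : String) (aliases : List String) (drugs : List (List (String × String))) (interventions : List (List (String × String))) : List (List (String × String)) :=
  let lowered := (aliases.filter (fun a => a ≠ "")).map (fun a => (a, PySem.Str.lower a))
  let entries := drugs.map (fun d => ("drug", pvGetName d))
      ++ interventions.map (fun iv => ("intervention", pvGetName iv))
  let matched := lowered.foldl
    (fun matched al => (matched.zip entries).map (fun p => pvStepOne al p.1 p.2))
    (entries.map (fun _ => (none : Option String)))
  (entries.zip matched).filterMap (fun p =>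
    p.2.map (fun ali => pvRowA modality_name (p.1.1 ++ " '" ++ p.1.2 ++ "' matches alias '" ++ ali ++ "'")))

-- ===== PRECONDITION & SPEC =====
def Spec_alias_hits_py (modality_name : String) (aliases : List String) (drugs : List (List (String × String))) (interventions : List (List (String × String))) (out : List (List (String × String))) : Prop := out = alias_hits_py_alt modality_name aliases drugs interventions
instance (modality_name : String) (aliases : List String) (drugs : List (List (String × String))) (interventions : List (List (String × String))) (out : List (List (String × String))) : Decidable (Spec_alias_hits_py modality_name aliases drugs interventions out) := by unfold Spec_alias_hits_py; infer_instance

-- ===== CLAIM (what is proved, stated in full; the proofs are below) =====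
def Claim_equal_alias_hits_py : Prop := ∀ (modality_name : String) (aliases : List String) (drugs : List (List (String × String))) (interventions : List (List (String × String))), Dom_alias_hits_py modality_name aliases drugs interventions → Spec_alias_hits_py modality_name aliases drugs interventions (alias_hits_py modality_name aliases drugs interventions)

-- ===== LEMMAS AND PROOFS =====

lemma pvZipMapSelfL {α β γ : Type} (es : List α) (g : α → β) (f : α → γ) :
    (es.map g).zip (es.map f) = es.map (fun e => (g e, f e)) := by
  induction es with
  | nil => rfl
  | cons e t ih => simp [ih]

lemma pvMatchedEq (lowered es : List (String × String)) (g : String × String → Option String) :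
    lowered.foldl (fun matched al => (matched.zip es).map (fun p => pvStepOne al p.1 p.2)) (es.map g)
      = es.map (fun e => lowered.foldl (fun m al => pvStepOne al m e) (g e)) := by
  induction lowered generalizing g with
  | nil => simp
  | cons al rest ih =>
    simp only [List.foldl_cons]
    have hz : (es.map g).zip es = es.map (fun e => (g e, e)) := by
      simpa using pvZipMapSelfL es g id
    rw [hz, List.map_map]
    exact ih (fun e => pvStepOne al (g e) e)

lemma pvKeepSome (lowered : List (String × String)) (e : String × String) (a : String) :
    lowered.foldl (fun m al => pvStepOne al m e) (some a) = some a := by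
  induction lowered with
  | nil => rfl
  | cons al rest ih => simpa [pvStepOne] using ih

lemma pvFirstEq (lowered : List (String × String)) (h : ∀ p ∈ lowered, p.2 ≠ "") (e : String × String) :
    lowered.foldl (fun m al => pvStepOne al m e) none = pvFindAliasA lowered (PySem.Str.lower e.2) := by
  induction lowered with
  | nil => rfl
  | cons al rest ih =>
    obtain ⟨a, la⟩ := al
    have hla : la ≠ "" := h (a, la) (by simp)
    have ih2 := ih (fun p hp => h p (List.mem_cons_of_mem _ hp))
    simp only [List.foldl_cons, pvFindAliasA]
    by_cases hc : PySem.Str.isIn la (PySem.Str.lower e.2) = true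
    · have hc2 : PySem.Chars.isIn la.toList (PySem.Chars.lower e.2.toList) = true := by simpa using hc
      rw [if_pos ⟨hla, hc⟩]
      have hs : pvStepOne (a, la) (none : Option String) e = some a := by simp [pvStepOne, hc2]
      rw [hs]
      exact pvKeepSome rest e a
    · rw [if_neg (by tauto)]
      have hc2 : PySem.Chars.isIn la.toList (PySem.Chars.lower e.2.toList) = false := by
        simpa using hc
      have hs : pvStepOne (a, la) (none : Option String) e = none := by simp [pvStepOne, hc2]
      rw [hs]
      exact ih2

lemma pvFoldAppend {α : Type} (l : List α) (init : List (List (String × String)))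
    (h : α → Option String) (g : α → String → List (String × String)) :
    l.foldl (fun out x => match h x with | some a => out ++ [g x a] | none => out) init
      = init ++ l.filterMap (fun x => (h x).map (g x)) := by
  induction l generalizing init with
  | nil => simp
  | cons x t ih =>
    simp only [List.foldl_cons, List.filterMap_cons]
    cases hx : h x <;> simp [ih]

lemma pvStrDrug : ("drug" : String) ++ " '" = "drug '" := by decide

lemma pvStrIv : ("intervention" : String) ++ " '" = "intervention '" := by decide

lemma pvLowerNe (a : String) (h : a ≠ "") : PySem.Str.lower a ≠ "" := by
  intro hc
  apply h
  have := congrArg String.toList hc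
  simp [PySem.Str.toList_lower, PySem.Chars.lower] at this
  exact this


-- ===== VERDICT (by name: the statement is the Claim_ definition above) =====
theorem alias_hits_py_spec : Claim_equal_alias_hits_py := by
  intro mn aliases drugs ivs _
  unfold Spec_alias_hits_py
  set lowered := (aliases.filter (fun a => a ≠ "")).map (fun a => (a, PySem.Str.lower a)) with hl
  have hlo : ∀ p ∈ lowered, p.2 ≠ "" := by
    intro p hp
    rw [hl] at hp
    simp only [List.mem_map, List.mem_filter] at hp
    obtain ⟨a, ⟨_, hane⟩, rfl⟩ := hp
    exact pvLowerNe a (by simpa using hane)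
  have hB : alias_hits_py_alt mn aliases drugs ivs =
      drugs.filterMap (fun d => (pvFindAliasA lowered (PySem.Str.lower (pvGetName d))).map
          (fun a => pvRowA mn ("drug '" ++ pvGetName d ++ "' matches alias '" ++ a ++ "'")))
      ++ ivs.filterMap (fun iv => (pvFindAliasA lowered (PySem.Str.lower (pvGetName iv))).map
          (fun a => pvRowA mn ("intervention '" ++ pvGetName iv ++ "' matches alias '" ++ a ++ "'"))) := by
    simp only [alias_hits_py_alt, ← hl]
    rw [pvMatchedEq lowered _ (fun _ => none)]
    have hz : ∀ (es : List (String × String)) (f : String × String → Option String),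
        es.zip (es.map f) = es.map (fun e => (e, f e)) := by
      intro es f; simpa using pvZipMapSelfL es id f
    rw [hz]
    simp only [List.map_append, List.filterMap_append, List.filterMap_map, Function.comp_def,
      pvFirstEq lowered hlo]
    simp [pvStrDrug, pvStrIv]
  have hA : alias_hits_py mn aliases drugs ivs =
      drugs.filterMap (fun d => (pvFindAliasA lowered (PySem.Str.lower (pvGetName d))).map
          (fun a => pvRowA mn ("drug '" ++ pvGetName d ++ "' matches alias '" ++ a ++ "'")))
      ++ ivs.filterMap (fun iv => (pvFindAliasA lowered (PySem.Str.lower (pvGetName iv))).map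
          (fun a => pvRowA mn ("intervention '" ++ pvGetName iv ++ "' matches alias '" ++ a ++ "'"))) := by
    by_cases h0 : aliases = []
    · have hle : lowered = [] := by simp [hl, h0]
      simp [alias_hits_py, h0, hle, pvFindAliasA]
    · simp only [alias_hits_py, if_neg h0, ← hl]
      rw [pvFoldAppend drugs []
        (fun d => pvFindAliasA lowered (PySem.Str.lower (pvGetName d)))
        (fun d a => pvRowA mn ("drug '" ++ pvGetName d ++ "' matches alias '" ++ a ++ "'"))]
      rw [pvFoldAppend ivs _
        (fun iv => pvFindAliasA lowered (PySem.Str.lower (pvGetName iv)))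
        (fun iv a => pvRowA mn ("intervention '" ++ pvGetName iv ++ "' matches alias '" ++ a ++ "'"))]
      simp
  rw [hA, hB]
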